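-- pv_equiv track=rewrite | github.com/Rezacs/SoftwareSystemEngineering-UniPi | 7-evaluation/evaluation_controller.py | evaluate
-- ===== SOURCE A (Python) =====
-- def evaluate(label_pairs: list) -> dict:
--     total_errors = 0
--     max_consecutive_errors = 0
--     current_consecutive_errors = 0
--
--     for pair in label_pairs:
--         is_error = pair["expert_label"] != pair["classifier_label"]
--
--         if is_error:
--             total_errors += 1
--             current_consecutive_errors += 1
--             max_consecutive_errors = max(
--                 max_consecutive_errors,
--                 current_consecutive_errors
--             )
--         else:
--             current_consecutive_errors = 0
--
--     return {
--         "num_sessions": len(label_pairs),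
--         "total_errors": total_errors,
--         "max_consecutive_errors": max_consecutive_errors
--     }
-- ===== SOURCE B (Python) =====
-- def evaluate(label_pairs: list) -> dict:
--     # Two-pass run-grouping decomposition: build the error-indicator list first,
--     # then group it into maximal (value, run-length) runs; totals fall out of the lists.
--     errors = [pair["expert_label"] != pair["classifier_label"] for pair in label_pairs]
--
--     runs = []  # (value, length) of each maximal run, in order
--     for e in errors:
--         if runs and runs[-1][0] == e:
--             runs[-1] = (e, runs[-1][1] + 1)
--         else:
--             runs.append((e, 1))
--
--     return {
--         "num_sessions": len(label_pairs),
--         "total_errors": sum(errors),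
--         "max_consecutive_errors": max([n for v, n in runs if v], default=0),
--     }
-- ===== Notes on version B (the rewrite author's own statement) =====
-- stated objective: alternative
-- what changed: Replaces A's stateful single scan (running counter + running max with if/else) by a two-pass decomposition: precompute the error-indicator list, group it into maximal (value, run-length) runs, then read total_errors as sum(errors) and max_consecutive_errors as the max over true-run lengths.
import Mathlib
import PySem

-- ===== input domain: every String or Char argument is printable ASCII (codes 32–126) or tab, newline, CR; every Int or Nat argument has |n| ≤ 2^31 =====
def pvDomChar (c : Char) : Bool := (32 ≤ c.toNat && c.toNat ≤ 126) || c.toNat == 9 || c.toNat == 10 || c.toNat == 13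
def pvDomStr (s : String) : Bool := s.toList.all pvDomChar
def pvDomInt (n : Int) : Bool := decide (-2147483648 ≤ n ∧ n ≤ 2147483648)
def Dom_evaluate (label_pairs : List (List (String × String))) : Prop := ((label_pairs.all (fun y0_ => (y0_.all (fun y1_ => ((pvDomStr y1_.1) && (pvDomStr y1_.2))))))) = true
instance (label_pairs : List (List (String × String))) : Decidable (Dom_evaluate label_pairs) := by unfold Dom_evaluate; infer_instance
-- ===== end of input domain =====

-- B replaces A's stateful scan by a two-pass decomposition (indicator list, then run
-- grouping); equal return value on all inputs where A returns (Pre_ = both keys present).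

-- ===== PORT A =====
def evaluate (label_pairs : List (List (String × String))) : List (String × Int) :=
  let s := label_pairs.foldl (fun (s : Int × Int × Int) pair =>
      let is_error := ((List.lookup "expert_label" pair).getD "") != ((List.lookup "classifier_label" pair).getD "")
      if is_error then (s.1 + 1, max s.2.1 (s.2.2 + 1), s.2.2 + 1)
      else (s.1, s.2.1, 0))
    (0, 0, 0)
  [("num_sessions", (label_pairs.length : Int)),
   ("total_errors", s.1),
   ("max_consecutive_errors", s.2.1)]

-- ===== PORT B =====
-- pair["expert_label"] != pair["classifier_label"] (keys present under Pre_)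
def pvErr (pair : List (String × String)) : Bool :=
  ((List.lookup "expert_label" pair).getD "") != ((List.lookup "classifier_label" pair).getD "")

-- one step of B's run-grouping loop: extend the last run or start a new one
def pvRunsStep (runs : List (Bool × Int)) (e : Bool) : List (Bool × Int) :=
  match runs.getLast? with
  | some (v, n) => if v == e then runs.dropLast ++ [(e, n + 1)] else runs ++ [(e, 1)]
  | none => [(e, 1)]

def evaluate_alt (label_pairs : List (List (String × String))) : List (String × Int) :=
  let errors := label_pairs.map pvErr
  let runs := errors.foldl pvRunsStep []
  [("num_sessions", (label_pairs.length : Int)),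
   ("total_errors", errors.foldl (fun s e => s + (if e then 1 else 0)) 0),
   ("max_consecutive_errors", (runs.filterMap (fun r => if r.1 then some r.2 else none)).foldl max 0)]

-- ===== PRECONDITION & SPEC =====
-- Pre_ excludes exactly the inputs where Python A raises KeyError: a pair missing
-- "expert_label" or "classifier_label".
def Pre_evaluate (label_pairs : List (List (String × String))) : Prop :=
  (label_pairs.all (fun p => (List.lookup "expert_label" p).isSome && (List.lookup "classifier_label" p).isSome)) = true
instance (label_pairs : List (List (String × String))) : Decidable (Pre_evaluate label_pairs) := by unfold Pre_evaluate; infer_instance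

def pvWitness_evaluate : (List (List (String × String))) :=
  [[("expert_label", "spam"), ("classifier_label", "ham")],
   [("expert_label", "ham"), ("classifier_label", "ham")]]

def Spec_evaluate (label_pairs : List (List (String × String))) (out : List (String × Int)) : Prop := out = evaluate_alt label_pairs
instance (label_pairs : List (List (String × String))) (out : List (String × Int)) : Decidable (Spec_evaluate label_pairs out) := by unfold Spec_evaluate; infer_instance

-- ===== CLAIM (what is proved, stated in full; the proofs are below) =====
def Claim_equal_evaluate : Prop := ∀ (label_pairs : List (List (String × String))), Dom_evaluate label_pairs → Pre_evaluate label_pairs → Spec_evaluate label_pairs (evaluate label_pairs)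

-- ===== LEMMAS AND PROOFS =====

-- A's loop body, over the error bit alone
def pvStep (s : Int × Int × Int) (e : Bool) : Int × Int × Int :=
  if e then (s.1 + 1, max s.2.1 (s.2.2 + 1), s.2.2 + 1) else (s.1, s.2.1, 0)

-- length of the trailing true-run of a run list (0 if it ends in a false run or is empty)
def pvLastTrue (runs : List (Bool × Int)) : Int :=
  match runs.getLast? with
  | some (true, n) => n
  | _ => 0

-- max over the true-run lengths (B's final max, default 0)
def pvMaxTrue (runs : List (Bool × Int)) : Int :=
  (runs.filterMap (fun r => if r.1 then some r.2 else none)).foldl max 0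

lemma pvLastTrue_step_true (acc : List (Bool × Int)) :
    pvLastTrue (pvRunsStep acc true) = pvLastTrue acc + 1 := by
  unfold pvRunsStep
  rcases h : acc.getLast? with _ | ⟨v, n⟩
  · simp [pvLastTrue, h]
  · cases v <;> simp [pvLastTrue, h]

lemma pvLastTrue_step_false (acc : List (Bool × Int)) :
    pvLastTrue (pvRunsStep acc false) = 0 := by
  unfold pvRunsStep
  rcases h : acc.getLast? with _ | ⟨v, n⟩
  · simp [pvLastTrue]
  · cases v <;> simp [pvLastTrue, h]

lemma pvMaxTrue_step_true (acc : List (Bool × Int)) :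
    pvMaxTrue (pvRunsStep acc true) = max (pvMaxTrue acc) (pvLastTrue acc + 1) := by
  unfold pvRunsStep
  rcases h : acc.getLast? with _ | ⟨v, n⟩
  · rw [List.getLast?_eq_none_iff] at h
    subst h
    simp [pvLastTrue, pvMaxTrue]
  · obtain ⟨ys, rfl⟩ := List.getLast?_eq_some_iff.mp h
    cases v
    · simp only [pvLastTrue, List.getLast?_concat]
      simp [pvMaxTrue, List.filterMap_append, List.foldl_append]
    · simp only [pvLastTrue, List.getLast?_concat]
      simp [pvMaxTrue, List.filterMap_append, List.foldl_append]

lemma pvMaxTrue_step_false (acc : List (Bool × Int)) :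
    pvMaxTrue (pvRunsStep acc false) = pvMaxTrue acc := by
  unfold pvRunsStep
  rcases h : acc.getLast? with _ | ⟨v, n⟩
  · rw [List.getLast?_eq_none_iff] at h
    subst h
    simp [pvMaxTrue]
  · obtain ⟨ys, rfl⟩ := List.getLast?_eq_some_iff.mp h
    cases v <;> simp [pvMaxTrue, List.filterMap_append, List.foldl_append]

-- coupled-invariant induction: A's state (total, max, current) against B's run list
lemma pv_key (bs : List Bool) : ∀ (te : Int) (acc : List (Bool × Int)),
    bs.foldl pvStep (te, pvMaxTrue acc, pvLastTrue acc) =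
      (te + bs.foldl (fun s e => s + (if e then 1 else 0)) 0,
       pvMaxTrue (bs.foldl pvRunsStep acc),
       pvLastTrue (bs.foldl pvRunsStep acc)) := by
  induction bs with
  | nil => intro te acc; simp
  | cons e bs ih =>
    intro te acc
    have hs : ∀ (a : Int), bs.foldl (fun s e => s + (if e then 1 else 0)) a
        = a + (bs.map (fun e => if e then 1 else 0)).sum := by
      intro a
      exact PySem.List.foldl_add bs (fun e => if e then 1 else 0) a
    cases e
    · have h1 : pvStep (te, pvMaxTrue acc, pvLastTrue acc) false
          = (te, pvMaxTrue (pvRunsStep acc false), pvLastTrue (pvRunsStep acc false)) := by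
        simp [pvStep, pvMaxTrue_step_false, pvLastTrue_step_false]
      simp only [List.foldl_cons, h1, ih te (pvRunsStep acc false)]
      norm_num
    · have h1 : pvStep (te, pvMaxTrue acc, pvLastTrue acc) true
          = (te + 1, pvMaxTrue (pvRunsStep acc true), pvLastTrue (pvRunsStep acc true)) := by
        simp [pvStep, pvMaxTrue_step_true, pvLastTrue_step_true]
      simp only [List.foldl_cons, h1, ih (te + 1) (pvRunsStep acc true)]
      simp [hs]
      omega

-- ===== VERDICT (by name: the statement is the Claim_ definition above) =====
theorem evaluate_spec : Claim_equal_evaluate := by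
  intro lps _ _
  unfold Spec_evaluate evaluate evaluate_alt
  have hA : lps.foldl (fun (s : Int × Int × Int) pair =>
      let is_error := ((List.lookup "expert_label" pair).getD "") != ((List.lookup "classifier_label" pair).getD "")
      if is_error then (s.1 + 1, max s.2.1 (s.2.2 + 1), s.2.2 + 1)
      else (s.1, s.2.1, 0)) (0, 0, 0)
      = (lps.map pvErr).foldl pvStep (0, 0, 0) := by
    rw [List.foldl_map]
    rfl
  rw [hA]
  have := pv_key (lps.map pvErr) 0 []
  have h0 : (pvMaxTrue [] : Int) = 0 := rfl
  have h1 : (pvLastTrue [] : Int) = 0 := rfl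
  rw [h0, h1] at this
  rw [this]
  simp [pvMaxTrue]
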